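-- pv_equiv track=rewrite | github.com/kalyugwasi/Practice | 2645.minimum-additions-to-make-valid-string.py | addMinimum
-- ===== SOURCE A (Python) =====
-- def addMinimum(word: str) -> int:
--     it = 0
--     result = 0
--     while it < len(word):
--         if word[it:it+3] == "abc":
--             it +=3
--         elif word[it:it+2] in ["ab","bc","ac"]:
--             result +=1
--             it += 2
--         else:
--             result += 2
--             it += 1
--     return result
-- ===== SOURCE B (Python) =====
-- def addMinimum(word: str) -> int:
--     # closed form: 3 * (number of maximal "abc"-subsequence runs) - len(word)
--     if not word:
--         return 0
--     groups = 1
--     prev = word[0]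
--     for ch in word[1:]:
--         if (prev, ch) not in (('a', 'b'), ('b', 'c'), ('a', 'c')):
--             groups += 1
--         prev = ch
--     return 3 * groups - len(word)
-- ===== Notes on version B (the rewrite author's own statement) =====
-- stated objective: simpler
-- what changed: Replaces the greedy scan that matches three-, two- and one-character substrings against pattern fragments with a single pass counting run boundaries between adjacent characters plus the closed form 3*groups - len(word); no slicing per step.
import Mathlib
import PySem

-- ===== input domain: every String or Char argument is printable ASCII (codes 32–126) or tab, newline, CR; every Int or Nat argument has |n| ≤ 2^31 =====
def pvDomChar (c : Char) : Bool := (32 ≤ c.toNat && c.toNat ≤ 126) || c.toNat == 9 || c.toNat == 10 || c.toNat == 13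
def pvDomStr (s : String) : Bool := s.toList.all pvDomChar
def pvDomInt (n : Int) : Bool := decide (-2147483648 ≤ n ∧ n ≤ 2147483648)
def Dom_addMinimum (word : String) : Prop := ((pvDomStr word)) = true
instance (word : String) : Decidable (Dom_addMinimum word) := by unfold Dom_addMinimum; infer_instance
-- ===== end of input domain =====

-- B replaces A's greedy 3/2/1-character substring-matching scan with a single pass counting
-- run boundaries between adjacent characters plus the closed form 3*groups - len (simpler).


-- ===== PORT A =====
-- while it < len(word): match "abc" (skip 3), a pair of "ab"/"bc"/"ac" (+1, skip 2), else (+2, skip 1)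
def addMinimumLoop (w : List Char) (it : Nat) (result : Int) : Int :=
  if it < w.length then
    if PySem.List.slice w (some (it : Int)) (some ((it : Int) + 3)) = ['a', 'b', 'c'] then
      addMinimumLoop w (it + 3) result
    else if PySem.List.slice w (some (it : Int)) (some ((it : Int) + 2)) ∈
        [['a', 'b'], ['b', 'c'], ['a', 'c']] then
      addMinimumLoop w (it + 2) (result + 1)
    else
      addMinimumLoop w (it + 1) (result + 2)
  else result
termination_by w.length - it

def addMinimum (word : String) : Int :=
  addMinimumLoop word.toList 0 0

-- ===== PORT B =====
def addMinimum_alt (word : String) : Int :=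
  match word.toList with
  | [] => 0
  | x :: rest =>
    let st := rest.foldl
      (fun (st : Int × Char) ch =>
        (if (st.2, ch) ∈ [('a', 'b'), ('b', 'c'), ('a', 'c')] then st.1 else st.1 + 1, ch))
      (1, x)
    3 * st.1 - (x :: rest).length

-- ===== PRECONDITION & SPEC =====
def Spec_addMinimum (word : String) (out : Int) : Prop := out = addMinimum_alt word
instance (word : String) (out : Int) : Decidable (Spec_addMinimum word out) := by unfold Spec_addMinimum; infer_instance

-- ===== CLAIM (what is proved, stated in full; the proofs are below) =====
def Claim_equal_addMinimum : Prop := ∀ (word : String), Dom_addMinimum word → Spec_addMinimum word (addMinimum word)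

-- ===== LEMMAS AND PROOFS =====

-- cost of the greedy scan, expressed structurally on the remaining suffix
def gcost : List Char → Int
  | [] => 0
  | [_] => 2
  | x :: y :: t =>
    if x = 'a' ∧ y = 'b' ∧ t.take 1 = ['c'] then gcost (t.drop 1)
    else if (x, y) ∈ [('a', 'b'), ('b', 'c'), ('a', 'c')] then 1 + gcost t
    else 2 + gcost (y :: t)
termination_by l => l.length
decreasing_by
  · simp; omega
  · simp
  · simp

-- number of run boundaries after a character p followed by the list
def breaksCount : Char → List Char → Int
  | _, [] => 0
  | p, y :: t => (if (p, y) ∈ [('a', 'b'), ('b', 'c'), ('a', 'c')] then 0 else 1) + breaksCount y t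

def lastC : Char → List Char → Char
  | p, [] => p
  | _, y :: t => lastC y t

lemma foldB_eq (t : List Char) : ∀ (k : Int) (p : Char),
    t.foldl (fun (st : Int × Char) ch =>
        (if (st.2, ch) ∈ [('a', 'b'), ('b', 'c'), ('a', 'c')] then st.1 else st.1 + 1, ch)) (k, p)
      = (k + breaksCount p t, lastC p t) := by
  induction t with
  | nil => intro k p; simp [breaksCount, lastC]
  | cons y t ih =>
    intro k p
    simp only [List.foldl_cons, breaksCount, lastC]
    by_cases h : (p, y) ∈ [('a', 'b'), ('b', 'c'), ('a', 'c')]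
    · rw [if_pos h, if_pos h, ih, Prod.mk.injEq]
      exact ⟨by ring, rfl⟩
    · rw [if_neg h, if_neg h, ih, Prod.mk.injEq]
      exact ⟨by ring, rfl⟩

lemma loop_eq_gcost (w : List Char) : ∀ (it : Nat) (r : Int),
    addMinimumLoop w it r = r + gcost (w.drop it) := by
  intro it r
  fun_induction addMinimumLoop w it r with
  | case1 it r hlt habc ih =>
    rw [ih]
    have h3 : w.drop (it + 3) = (w.drop it).drop 3 := by rw [List.drop_drop]
    rw [show ((it : Int) + 3) = ((it : Int) + ((3 : Nat) : Int)) from by norm_cast,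
      PySem.List.slice_natCast_add] at habc
    rcases hd : w.drop it with _ | ⟨x, _ | ⟨y, t⟩⟩ <;> rw [hd] at habc <;> simp at habc
    obtain ⟨hx, hy, ht⟩ := habc
    rw [h3, hd, gcost]
    simp [hx, hy, ht]
  | case2 it r hlt habc hpair ih =>
    rw [ih]
    have h2 : w.drop (it + 2) = (w.drop it).drop 2 := by rw [List.drop_drop]
    rw [show ((it : Int) + 3) = ((it : Int) + ((3 : Nat) : Int)) from by norm_cast,
      PySem.List.slice_natCast_add] at habc
    rw [show ((it : Int) + 2) = ((it : Int) + ((2 : Nat) : Int)) from by norm_cast,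
      PySem.List.slice_natCast_add] at hpair
    have hne : w.drop it ≠ [] := by
      intro h; rw [List.drop_eq_nil_iff] at h; omega
    rcases hd : w.drop it with _ | ⟨x, _ | ⟨y, t⟩⟩
    · exact absurd hd hne
    · rw [hd] at hpair; simp at hpair
    · rw [hd] at habc hpair
      simp at hpair
      have habc' : ¬ (x = 'a' ∧ y = 'b' ∧ t.take 1 = ['c']) := by
        intro ⟨hx, hy, ht⟩; rw [hx, hy] at habc; simp [ht] at habc
      rw [h2, hd, gcost]
      simp only [habc', if_false, List.drop_succ_cons, List.drop_zero]
      have : (x, y) ∈ [('a', 'b'), ('b', 'c'), ('a', 'c')] := by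
        simp; tauto
      rw [if_pos this]; ring
  | case3 it r hlt habc hpair ih =>
    rw [ih]
    have h1 : w.drop (it + 1) = (w.drop it).drop 1 := by rw [List.drop_drop]
    rw [show ((it : Int) + 3) = ((it : Int) + ((3 : Nat) : Int)) from by norm_cast,
      PySem.List.slice_natCast_add] at habc
    rw [show ((it : Int) + 2) = ((it : Int) + ((2 : Nat) : Int)) from by norm_cast,
      PySem.List.slice_natCast_add] at hpair
    have hne : w.drop it ≠ [] := by
      intro h; rw [List.drop_eq_nil_iff] at h; omega
    rcases hd : w.drop it with _ | ⟨x, _ | ⟨y, t⟩⟩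
    · exact absurd hd hne
    · rw [h1, hd]; simp [gcost]
    · rw [hd] at habc hpair
      simp at hpair
      have habc' : ¬ (x = 'a' ∧ y = 'b' ∧ t.take 1 = ['c']) := by
        intro ⟨hx, hy, ht⟩; rw [hx, hy] at habc; simp [ht] at habc
      have hp' : ¬ ((x, y) ∈ [('a', 'b'), ('b', 'c'), ('a', 'c')]) := by
        simp; tauto
      rw [h1, hd, gcost]
      simp only [habc', if_false, hp', List.drop_succ_cons, List.drop_zero]
      ring
  | case4 it r hge =>
    have hnil : w.drop it = [] := List.drop_eq_nil_iff.mpr (by omega)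
    simp [hnil, gcost]

lemma gcost_closed (w : List Char) : ∀ (x : Char) (rest : List Char), w = x :: rest →
    gcost w = 3 * (1 + breaksCount x rest) - w.length := by
  fun_induction gcost w with
  | case1 => intro x rest h; simp at h
  | case2 c => intro x rest h
               obtain ⟨hx, hr⟩ := List.cons.injEq .. ▸ h
               subst hr; simp [breaksCount]
  | case3 x y t habc ih =>
    intro x' rest h
    obtain ⟨hx, hy, ht⟩ := habc
    subst hx hy
    rcases t with _ | ⟨z, t'⟩ <;> simp at ht
    subst ht
    obtain ⟨hx', hr⟩ := List.cons.injEq .. ▸ h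
    subst hx' hr
    simp only [List.drop_succ_cons, List.drop_zero] at ih ⊢
    rcases t' with _ | ⟨u, t''⟩
    · simp [gcost, breaksCount]
    · rw [ih u t'' rfl]
      simp [breaksCount]
      ring
  | case4 x y t habc hpair ih =>
    intro x' rest h
    obtain ⟨hx', hr⟩ := List.cons.injEq .. ▸ h
    subst hx' hr
    rcases t with _ | ⟨z, t'⟩
    · simp at hpair
      simp [gcost, breaksCount, hpair]
    · rw [ih z t' rfl]
      have hyz : (y, z) ∉ ([('a', 'b'), ('b', 'c'), ('a', 'c')] : List (Char × Char)) := by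
        intro hm
        simp only [List.mem_cons, List.not_mem_nil, or_false, Prod.mk.injEq] at hpair hm
        apply habc
        rcases hm with ⟨hy, hz⟩ | ⟨hy, hz⟩ | ⟨hy, hz⟩ <;>
          rcases hpair with ⟨hx, hy2⟩ | ⟨hx, hy2⟩ | ⟨hx, hy2⟩ <;> subst_vars <;> simp_all
      simp [breaksCount, hpair, hyz]
      ring
  | case5 x y t habc hpair ih =>
    intro x' rest h
    obtain ⟨hx', hr⟩ := List.cons.injEq .. ▸ h
    subst hx' hr
    rw [ih y t rfl]
    simp [breaksCount, hpair]
    ring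

-- ===== VERDICT (by name: the statement is the Claim_ definition above) =====
theorem addMinimum_spec : Claim_equal_addMinimum := by
  intro word _
  unfold Spec_addMinimum addMinimum addMinimum_alt
  rcases hw : word.toList with _ | ⟨x, rest⟩
  · rw [loop_eq_gcost]; simp [gcost]
  · rw [loop_eq_gcost]
    simp only [List.drop_zero, foldB_eq]
    rw [gcost_closed (x :: rest) x rest rfl]
    simp
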